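-- pv_equiv track=rewrite | github.com/ladiach/mooc-fi-adv-python | part12/part12-08_even_numbers/src/even_numbers.py | even_numbers
-- ===== SOURCE A (Python) =====
-- def even_numbers(beginning: int, maximum: int):
--     number = beginning
--     while number <= maximum:
--         if number %2==0:
--             yield number
--             number +=1
--         else:
--             number +=1
-- ===== SOURCE B (Python) =====
-- def even_numbers(beginning: int, maximum: int):
--     start = beginning if beginning % 2 == 0 else beginning + 1
--     yield from range(start, maximum + 1, 2)
-- ===== Notes on version B (the rewrite author's own statement) =====
-- stated objective: idiomatic
-- what changed: B computes the first even value once and yields directly from range(start, maximum+1, 2), enumerating only even numbers instead of scanning every integer and testing parity.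
import Mathlib
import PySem

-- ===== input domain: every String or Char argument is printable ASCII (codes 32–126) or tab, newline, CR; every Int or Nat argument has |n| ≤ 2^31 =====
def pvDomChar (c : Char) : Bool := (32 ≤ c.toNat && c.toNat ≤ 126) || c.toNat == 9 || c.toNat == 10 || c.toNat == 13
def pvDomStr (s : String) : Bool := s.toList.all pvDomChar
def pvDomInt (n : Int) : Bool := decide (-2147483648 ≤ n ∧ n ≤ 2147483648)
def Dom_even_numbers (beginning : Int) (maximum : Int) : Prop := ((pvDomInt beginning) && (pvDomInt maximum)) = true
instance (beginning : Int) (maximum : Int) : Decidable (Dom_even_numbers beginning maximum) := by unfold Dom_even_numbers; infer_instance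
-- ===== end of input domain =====

-- B computes the first even value once and yields directly from range(start, maximum+1, 2)
-- instead of scanning every integer and testing parity (idiomatic rewrite, same results).


-- ===== PORT A =====
-- 'while number <= maximum: if number % 2 == 0: yield number; number += 1 else: number += 1'
def evLoop (number : Int) (maximum : Int) : List Int :=
  if _h : number ≤ maximum then
    if PySem.Int.mod number 2 == 0 then
      number :: evLoop (number + 1) maximum
    else
      evLoop (number + 1) maximum
  else []
termination_by (maximum + 1 - number).toNat
decreasing_by all_goals omega

def even_numbers (beginning : Int) (maximum : Int) : List Int :=
  evLoop beginning maximum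

-- ===== PORT B =====
-- start = beginning if beginning % 2 == 0 else beginning + 1; yield from range(start, maximum+1, 2)
def even_numbers_alt (beginning : Int) (maximum : Int) : List Int :=
  let start := if PySem.Int.mod beginning 2 == 0 then beginning else beginning + 1
  PySem.List.pyRange start (maximum + 1) 2

-- ===== PRECONDITION & SPEC =====
def Spec_even_numbers (beginning : Int) (maximum : Int) (out : List Int) : Prop := out = even_numbers_alt beginning maximum
instance (beginning : Int) (maximum : Int) (out : List Int) : Decidable (Spec_even_numbers beginning maximum out) := by unfold Spec_even_numbers; infer_instance

-- ===== CLAIM (what is proved, stated in full; the proofs are below) =====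
def Claim_equal_even_numbers : Prop := ∀ (beginning : Int) (maximum : Int), Dom_even_numbers beginning maximum → Spec_even_numbers beginning maximum (even_numbers beginning maximum)

-- ===== LEMMAS AND PROOFS =====

theorem pyRange_two_nil (a b : Int) (h : b ≤ a) : PySem.List.pyRange a b 2 = [] := by
  rw [PySem.List.pyRange_of_pos a b (by norm_num)]
  rw [if_neg (by omega)]
  simp

theorem pyRange_two_cons (a b : Int) (h : a < b) :
    PySem.List.pyRange a b 2 = a :: PySem.List.pyRange (a + 2) b 2 := by
  rw [PySem.List.pyRange_of_pos a b (by norm_num),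
      PySem.List.pyRange_of_pos (a + 2) b (by norm_num)]
  rw [if_pos h]
  have hcount : ((b - a + 2 - 1) / 2).toNat
      = (if a + 2 < b then ((b - (a + 2) + 2 - 1) / 2).toNat else 0) + 1 := by
    split_ifs with h2 <;> omega
  rw [hcount, List.range_succ_eq_map]
  simp [List.map_map, Function.comp]
  intro k _
  push_cast
  ring

theorem evLoop_eq_pyRange (number maximum : Int) :
    evLoop number maximum
      = PySem.List.pyRange
          (if PySem.Int.mod number 2 == 0 then number else number + 1)
          (maximum + 1) 2 := by
  have hmod := PySem.Int.mod_nonneg number (b := 2) (by norm_num)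
  have hmlt := PySem.Int.mod_lt number (b := 2) (by norm_num)
  have hdvd := PySem.Int.mod_eq_zero_iff_dvd number 2
  have hdvd' := PySem.Int.mod_eq_zero_iff_dvd (number + 1) 2
  by_cases hle : number ≤ maximum
  · by_cases he : PySem.Int.mod number 2 = 0
    · -- number even: A yields number and continues from number+1 (odd)
      have hodd : ¬ PySem.Int.mod (number + 1) 2 = 0 := by
        intro hc
        have h1 : (2 : Int) ∣ number := hdvd.mp he
        have h2 : (2 : Int) ∣ number + 1 := hdvd'.mp hc
        omega
      rw [evLoop, dif_pos hle, if_pos (by simp only [beq_iff_eq]; exact he),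
          evLoop_eq_pyRange (number + 1) maximum,
          if_neg (by simp only [beq_iff_eq]; exact hodd), if_pos (by simp only [beq_iff_eq]; exact he),
          pyRange_two_cons number (maximum + 1) (by omega)]
      have h12 : number + 1 + 1 = number + 2 := by ring
      rw [h12]
    · -- number odd: A skips number; number+1 is even
      have heven : PySem.Int.mod (number + 1) 2 = 0 := by
        have h1 : ¬ (2 : Int) ∣ number := fun hd => he (hdvd.mpr hd)
        exact hdvd'.mpr (by omega)
      rw [evLoop, dif_pos hle, if_neg (by simp only [beq_iff_eq]; exact he),
          evLoop_eq_pyRange (number + 1) maximum,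
          if_pos (by simp only [beq_iff_eq]; exact heven), if_neg (by simp only [beq_iff_eq]; exact he)]
  · -- number > maximum: both sides empty
    rw [evLoop, dif_neg hle]
    split_ifs with he
    · exact (pyRange_two_nil _ _ (by omega)).symm
    · exact (pyRange_two_nil _ _ (by omega)).symm
termination_by (maximum + 1 - number).toNat
decreasing_by all_goals omega

-- ===== VERDICT (by name: the statement is the Claim_ definition above) =====
theorem even_numbers_spec : Claim_equal_even_numbers := by
  intro beginning maximum _hdom
  unfold Spec_even_numbers even_numbers even_numbers_alt
  exact evLoop_eq_pyRange beginning maximum
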